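-- pv_equiv track=rewrite | github.com/Taniory/HakoniwaChartCatalog | scripts/export_review_js.py | _split_js_into_lines
-- ===== SOURCE A (Python) =====
-- def _split_js_into_lines(code: str) -> list[str]:
--     lines: list[str] = []
--     buf: list[str] = []
--     in_single = False
--     in_double = False
--     in_template = False
--     escaped = False
--
--     for ch in code:
--         buf.append(ch)
--         if escaped:
--             escaped = False
--             continue
--         if ch == "\\":
--             escaped = True
--             continue
--         if in_single:
--             if ch == "'":
--                 in_single = False
--             continue
--         if in_double:
--             if ch == '"':
--                 in_double = False
--             continue
--         if in_template:
--             if ch == "`":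
--                 in_template = False
--             continue
--         if ch == "'":
--             in_single = True
--             continue
--         if ch == '"':
--             in_double = True
--             continue
--         if ch == "`":
--             in_template = True
--             continue
--
--         if ch in {";", "{", "}", ","}:
--             line = "".join(buf).strip()
--             if line:
--                 lines.append(line)
--             buf = []
--
--     tail = "".join(buf).strip()
--     if tail:
--         lines.append(tail)
--
--     merged: list[str] = []
--     for line in lines:
--         token = line.strip()
--         if token in {",", ";"} and merged:
--             merged[-1] = f"{merged[-1]}{token}"
--             continue
--         merged.append(line)
--     return merged
-- ===== SOURCE B (Python) =====
-- def _split_js_into_lines(code: str) -> list[str]: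
--     result: list[str] = []
--     start = 0          # index where the current segment begins
--     quote = None       # the open string delimiter, or None at top level
--     skip = False       # previous character was a backslash
--     for i, ch in enumerate(code):
--         if skip:
--             skip = False
--         elif ch == "\\":
--             skip = True
--         elif quote is not None:
--             if ch == quote:
--                 quote = None
--         elif ch in "'\"`":
--             quote = ch
--         elif ch in ";{},":
--             seg = code[start:i + 1].strip()
--             start = i + 1
--             if seg in (",", ";") and result:
--                 result[-1] += seg
--             elif seg:
--                 result.append(seg)
--     tail = code[start:].strip()
--     if tail:
--         result.append(tail)
--     return result
-- ===== Notes on version B (the rewrite author's own statement) =====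
-- stated objective: alternative
-- what changed: B replaces A's char-buffer scan plus second merge pass by a single indexed scan: it tracks only the segment start index and one open-quote variable (instead of a buffer list and three booleans), cuts each segment out of the input by slicing at flush points, and merges a segment that strips to a bare delimiter onto the previous result entry inline, so no intermediate lines list or rescan exists.
import Mathlib
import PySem

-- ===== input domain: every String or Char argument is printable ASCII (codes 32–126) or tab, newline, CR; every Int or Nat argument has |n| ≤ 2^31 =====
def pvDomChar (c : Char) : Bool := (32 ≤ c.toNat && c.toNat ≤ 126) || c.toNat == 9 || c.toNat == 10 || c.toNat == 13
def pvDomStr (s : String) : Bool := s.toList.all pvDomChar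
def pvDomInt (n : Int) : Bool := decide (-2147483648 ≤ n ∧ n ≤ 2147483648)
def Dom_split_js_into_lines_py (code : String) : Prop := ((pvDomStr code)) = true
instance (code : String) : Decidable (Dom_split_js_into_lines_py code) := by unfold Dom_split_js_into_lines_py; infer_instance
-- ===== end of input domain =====

-- B replaces A's char buffer + second merge pass by one indexed scan that slices segments
-- out of the input at flush points and merges bare delimiters inline (objective: alternative).

-- ===== PORT A =====
structure PvScanA where
  lines : List String
  buf : List Char
  inS : Bool
  inD : Bool
  inT : Bool
  esc : Bool
  deriving Repr, DecidableEq

def pvStepA (st0 : PvScanA) (ch : Char) : PvScanA :=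
  let st := { st0 with buf := st0.buf ++ [ch] }   -- buf.append(ch)
  if st.esc then { st with esc := false }
  else if ch = '\\' then { st with esc := true }
  else if st.inS then (if ch = '\'' then { st with inS := false } else st)
  else if st.inD then (if ch = '"' then { st with inD := false } else st)
  else if st.inT then (if ch = '`' then { st with inT := false } else st)
  else if ch = '\'' then { st with inS := true }
  else if ch = '"' then { st with inD := true }
  else if ch = '`' then { st with inT := true }
  else if ch = ';' ∨ ch = '{' ∨ ch = '}' ∨ ch = ',' then
    let line := PySem.Str.strip (String.ofList st.buf)   -- "".join(buf).strip()
    { st with lines := if line ≠ "" then st.lines ++ [line] else st.lines, buf := [] }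
  else st

def pvMergeStep (merged : List String) (line : String) : List String :=
  let token := PySem.Str.strip line
  if (token = "," ∨ token = ";") ∧ merged ≠ [] then
    merged.dropLast ++ [merged.getLastD "" ++ token]   -- merged[-1] = merged[-1] + token
  else merged ++ [line]

def split_js_into_lines_py (code : String) : List String :=
  let st := code.toList.foldl pvStepA ⟨[], [], false, false, false, false⟩
  let tail := PySem.Str.strip (String.ofList st.buf)
  let lines := if tail ≠ "" then st.lines ++ [tail] else st.lines
  lines.foldl pvMergeStep []

-- ===== PORT B =====
structure PvB where
  result : List String
  start : Int
  quote : Option Char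
  skip : Bool
  deriving Repr, DecidableEq

def pvStepB (cs : List Char) (st : PvB) (p : Int × Char) : PvB :=
  let ch := p.2
  if st.skip then { st with skip := false }
  else if ch = '\\' then { st with skip := true }
  else if st.quote.isSome then (if some ch = st.quote then { st with quote := none } else st)
  else if ch = '\'' ∨ ch = '"' ∨ ch = '`' then { st with quote := some ch }
  else if ch = ';' ∨ ch = '{' ∨ ch = '}' ∨ ch = ',' then
    let seg := PySem.Str.strip (String.ofList (PySem.List.slice cs (some st.start) (some (p.1 + 1))))   -- code[start:i+1].strip()
    { st with
      result :=
        if (seg = "," ∨ seg = ";") ∧ st.result ≠ [] then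
          st.result.dropLast ++ [st.result.getLastD "" ++ seg]   -- result[-1] += seg
        else if seg ≠ "" then st.result ++ [seg]
        else st.result,
      start := p.1 + 1 }
  else st

def split_js_into_lines_py_alt (code : String) : List String :=
  let st := (PySem.List.enumerate code.toList 0).foldl (pvStepB code.toList) ⟨[], 0, none, false⟩
  let tail := PySem.Str.strip (String.ofList (PySem.List.slice code.toList (some st.start) none))   -- code[start:].strip()
  if tail ≠ "" then st.result ++ [tail] else st.result

-- ===== PRECONDITION & SPEC =====
def Spec_split_js_into_lines_py (code : String) (out : List String) : Prop := out = split_js_into_lines_py_alt code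
instance (code : String) (out : List String) : Decidable (Spec_split_js_into_lines_py code out) := by unfold Spec_split_js_into_lines_py; infer_instance

-- ===== CLAIM (what is proved, stated in full; the proofs are below) =====
def Claim_equal_split_js_into_lines_py : Prop := ∀ (code : String), Dom_split_js_into_lines_py code → Spec_split_js_into_lines_py code (split_js_into_lines_py code)

-- ===== LEMMAS AND PROOFS =====

theorem pv_strip_idem (l : List Char) : PySem.Chars.strip (PySem.Chars.strip l) = PySem.Chars.strip l := by
  simp only [PySem.Chars.strip, PySem.Chars.lstrip, PySem.Chars.rstrip]
  set p := PySem.Chars.isspace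
  set m := List.dropWhile p l with hm
  set t := (List.dropWhile p m.reverse).reverse with ht
  have htm : t <+: m := by
    have := List.dropWhile_suffix (l := m.reverse) p
    have := List.reverse_prefix.mpr (by simpa using this)
    simpa [ht] using this
  have hmne : t ≠ [] → m ≠ [] := by
    intro h hme; rw [hme] at htm; exact h (List.prefix_nil.mp htm)
  have hstep : List.dropWhile p t = t := by
    rcases eq_or_ne t [] with h | h
    · simp [h]
    · apply List.dropWhile_eq_self_iff.mpr
      intro hl
      have hhead : t.head h = m.head (hmne h) := htm.head h
      have hps : p (m.head (hmne h)) = false := by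
        have := List.head_dropWhile_not p (l := l) (by simpa [← hm] using hmne h)
        simpa [← hm] using this
      simp only [List.getElem_zero_eq_head]
      rw [hhead, hps]
      simp
  rw [hstep, ht, List.reverse_reverse, List.dropWhile_idempotent]

theorem pv_str_strip_idem (s : String) :
    PySem.Str.strip (PySem.Str.strip s) = PySem.Str.strip s := by
  apply String.toList_injective
  simp [pv_strip_idem]

-- B's inline flush on an already-stripped segment equals one step of A's merge pass.
theorem pv_emit_merge (res : List String) (s : String) :
    (if (PySem.Str.strip s = "," ∨ PySem.Str.strip s = ";") ∧ res ≠ [] then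
        res.dropLast ++ [res.getLastD "" ++ PySem.Str.strip s]
      else if PySem.Str.strip s ≠ "" then res ++ [PySem.Str.strip s]
      else res)
    = List.foldl pvMergeStep res
        (if PySem.Str.strip s ≠ "" then [PySem.Str.strip s] else []) := by
  by_cases h0 : PySem.Str.strip s = ""
  · simp [h0]
  · simp only [ne_eq, h0, not_false_iff, if_true, List.foldl_cons, List.foldl_nil,
      pvMergeStep, pv_str_strip_idem]

-- segment contains a character that is neither whitespace nor a bare delimiter
def pvG (l : List Char) : Prop :=
  ∃ c ∈ l, PySem.Chars.isspace c = false ∧ c ≠ ',' ∧ c ≠ ';'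

def pvInv (L : List Char) (i : Nat) (a : PvScanA) (b : PvB) : Prop :=
  b.result = a.lines.foldl pvMergeStep [] ∧
  b.skip = a.esc ∧
  b.quote = (if a.inS then some '\'' else if a.inD then some '"' else if a.inT then some '`' else none) ∧
  (¬(a.inS ∧ a.inD)) ∧ (¬(a.inS ∧ a.inT)) ∧ (¬(a.inD ∧ a.inT)) ∧
  ∃ s : Nat, b.start = (s : Int) ∧ s ≤ i ∧ a.buf = (L.take i).drop s ∧
    ((a.inS = true ∨ a.inD = true ∨ a.inT = true ∨ a.esc = true ∨ ',' ∈ a.buf ∨ ';' ∈ a.buf) → pvG a.buf)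

theorem pv_filter_dropWhile (p : Char → Bool) (l : List Char) :
    (l.dropWhile p).filter (fun c => !(p c)) = l.filter (fun c => !(p c)) := by
  induction l with
  | nil => rfl
  | cons h t ih =>
    by_cases hp : p h = true
    · simp [List.dropWhile_cons, hp, ih]
    · simp [List.dropWhile_cons, hp]

theorem pv_filter_strip (l : List Char) :
    (PySem.Chars.strip l).filter (fun c => !(PySem.Chars.isspace c)) =
      l.filter (fun c => !(PySem.Chars.isspace c)) := by
  simp only [PySem.Chars.strip, PySem.Chars.lstrip, PySem.Chars.rstrip]
  rw [List.filter_reverse, pv_filter_dropWhile, List.filter_reverse, List.reverse_reverse,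
    pv_filter_dropWhile]

theorem pv_mem_strip {c : Char} {l : List Char} (h : c ∈ PySem.Chars.strip l) : c ∈ l := by
  simp only [PySem.Chars.strip, PySem.Chars.lstrip, PySem.Chars.rstrip] at h
  rw [List.mem_reverse] at h
  have := (List.dropWhile_sublist (l := (List.dropWhile PySem.Chars.isspace l).reverse)
    (p := PySem.Chars.isspace)).mem h
  rw [List.mem_reverse] at this
  exact (List.dropWhile_sublist (l := l) (p := PySem.Chars.isspace)).mem this

-- If the buffer has a good character, its strip cannot be a bare ',' or ';'.
theorem pv_strip_not_delim {l : List Char} (hG : pvG l) (d : Char)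
    (hd : d = ',' ∨ d = ';') : PySem.Chars.strip l ≠ [d] := by
  intro h
  obtain ⟨c, hc, hcs, hc1, hc2⟩ := hG
  have hds : PySem.Chars.isspace d = false := by rcases hd with h' | h' <;> subst h' <;> decide
  have hmem : c ∈ l.filter (fun c => !(PySem.Chars.isspace c)) :=
    List.mem_filter.mpr ⟨hc, by simp [hcs]⟩
  rw [← pv_filter_strip, h] at hmem
  simp [hds] at hmem
  subst hmem
  rcases hd with h' | h' <;> [exact hc1 h'; exact hc2 h']

theorem pvG_snoc {l : List Char} (c : Char) (h : pvG l) : pvG (l ++ [c]) := by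
  obtain ⟨x, hx, hp⟩ := h
  exact ⟨x, List.mem_append_left _ hx, hp⟩

theorem pvG_last (l : List Char) (c : Char) (h1 : PySem.Chars.isspace c = false)
    (h2 : c ≠ ',') (h3 : c ≠ ';') : pvG (l ++ [c]) :=
  ⟨c, List.mem_append_right _ (List.mem_singleton.mpr rfl), h1, h2, h3⟩

set_option maxHeartbeats 1600000 in
theorem pv_step_rel (L : List Char) (i : Nat) (a : PvScanA) (b : PvB) (c : Char)
    (hc : L[i]? = some c) (h : pvInv L i a b) :
    pvInv L (i + 1) (pvStepA a c) (pvStepB L b ((i : Int), c)) := by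
  obtain ⟨h1, h2, h3, h4, h5, h6, s, hs, hsle, hbuf, hG⟩ := h
  obtain ⟨hi, hci⟩ := List.getElem?_eq_some_iff.mp hc
  have hltake : (L.take i).length = i := by rw [List.length_take]; omega
  have happ : (L.take (i + 1)).drop s = a.buf ++ [c] := by
    rw [List.take_add_one, hc, List.drop_append_of_le_length (by omega), hbuf]
    rfl
  simp only [pvStepA, pvStepB, h2, h3]
  by_cases he : a.esc = true
  · simp only [he, if_true]
    unfold pvInv
    try dsimp only
    exact ⟨h1, rfl, rfl, by simp_all, by simp_all, by simp_all, s, hs, by omega, happ.symm,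
      fun _ => pvG_snoc c (hG (by simp [he]))⟩
  · have he' : a.esc = false := by simpa using he
    simp only [he', Bool.false_eq_true, if_false]
    by_cases hb : c = '\\'
    · subst hb
      simp only [if_pos rfl]
      unfold pvInv
      try dsimp only
      exact ⟨h1, rfl, rfl, by simp_all, by simp_all, by simp_all, s, hs, by omega, happ.symm,
        fun _ => pvG_last _ _ (by decide) (by decide) (by decide)⟩
    · simp only [if_neg hb]
      by_cases hS : a.inS = true
      · simp only [hS, if_true, Option.isSome_some]
        have hGm : pvG (a.buf ++ [c]) := pvG_snoc c (hG (by simp [hS]))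
        by_cases hq : c = '\''
        · have hD : a.inD = false := Bool.eq_false_iff.mpr (fun hx => h4 ⟨hS, hx⟩)
          have hT : a.inT = false := Bool.eq_false_iff.mpr (fun hx => h5 ⟨hS, hx⟩)
          subst hq
          simp only [if_pos rfl, if_true]
          unfold pvInv
          try dsimp only
          exact ⟨h1, by simp [h2, he'], by simp [hD, hT], by simp, by simp, by simp [h6], s, hs, by omega,
            happ.symm, fun _ => hGm⟩
        · simp only [if_neg (fun hh : some c = some '\'' => hq (Option.some.inj hh)),
            if_neg hq]
          unfold pvInv
          try dsimp only
          exact ⟨h1, by simp [h2, he'], by simp [h3, hS], fun hx => h4 ⟨hS, hx.2⟩, fun hx => h5 ⟨hS, hx.2⟩, by simp_all,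
            s, hs, by omega, happ.symm, fun _ => hGm⟩
      · have hS' : a.inS = false := by simpa using hS
        simp only [hS', Bool.false_eq_true, if_false]
        by_cases hD : a.inD = true
        · simp only [hD, if_true, Option.isSome_some]
          have hGm : pvG (a.buf ++ [c]) := pvG_snoc c (hG (by simp [hD]))
          by_cases hq : c = '"'
          · have hT : a.inT = false := Bool.eq_false_iff.mpr (fun hx => h6 ⟨hD, hx⟩)
            subst hq
            simp only [if_pos rfl, if_true]
            unfold pvInv
            try dsimp only
            exact ⟨h1, by simp [h2, he'], by simp [hS', hT], by simp [hS'], by simp_all, by simp, s, hs, by omega,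
              happ.symm, fun _ => hGm⟩
          · simp only [if_neg (fun hh : some c = some '"' => hq (Option.some.inj hh)),
              if_neg hq]
            unfold pvInv
            try dsimp only
            exact ⟨h1, by simp [h2, he'], by simp [h3, hS', hD], by simp_all, by simp_all, by simp_all, s, hs, by omega, happ.symm,
              fun _ => hGm⟩
        · have hD' : a.inD = false := by simpa using hD
          simp only [hD', Bool.false_eq_true, if_false]
          by_cases hT : a.inT = true
          · simp only [hT, if_true, Option.isSome_some]
            have hGm : pvG (a.buf ++ [c]) := pvG_snoc c (hG (by simp [hT]))
            by_cases hq : c = '`'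
            · subst hq
              simp only [if_pos rfl, if_true]
              unfold pvInv
              try dsimp only
              exact ⟨h1, by simp [h2, he'], by simp [hS', hD'], by simp_all, by simp [hS'], by simp [hD'], s, hs,
                by omega, happ.symm, fun _ => hGm⟩
            · simp only [if_neg (fun hh : some c = some '`' => hq (Option.some.inj hh)),
                if_neg hq]
              unfold pvInv
              try dsimp only
              exact ⟨h1, by simp [h2, he'], by simp [h3, hS', hD', hT], by simp_all, by simp_all, by simp_all, s, hs, by omega, happ.symm,
                fun _ => hGm⟩
          · have hT' : a.inT = false := by simpa using hT
            simp only [hT', Bool.false_eq_true, if_false, Option.isSome_none]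
            by_cases hq1 : c = '\''
            · subst hq1
              simp only [if_pos rfl, if_true]
              unfold pvInv
              try dsimp only
              exact ⟨h1, by simp [h2, he'], by simp, by simp [hD'], by simp [hT'], by simp_all, s, hs, by omega,
                happ.symm, fun _ => pvG_last _ _ (by decide) (by decide) (by decide)⟩
            · by_cases hq2 : c = '"'
              · subst hq2
                simp only [if_neg hq1, if_pos rfl, if_true]
                unfold pvInv
                try dsimp only
                exact ⟨h1, by simp [h2, he'], by simp [hS'], by simp [hS'], by simp_all, by simp [hT'], s, hs,
                  by omega, happ.symm, fun _ => pvG_last _ _ (by decide) (by decide) (by decide)⟩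
              · by_cases hq3 : c = '`'
                · subst hq3
                  simp only [if_neg hq1, if_neg hq2, if_pos rfl]
                  unfold pvInv
                  try dsimp only
                  exact ⟨h1, by simp [h2, he'], by simp [hS', hD'], by simp_all, by simp [hS'], by simp [hD'], s, hs,
                    by omega, happ.symm,
                    fun _ => pvG_last _ _ (by decide) (by decide) (by decide)⟩
                · have hqor : ¬(c = '\'' ∨ c = '"' ∨ c = '`') := by
                    rintro (h' | h' | h') <;> [exact hq1 h'; exact hq2 h'; exact hq3 h']
                  simp only [if_neg hq1, if_neg hq2, if_neg hq3, if_neg hqor]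
                  by_cases hdel : c = ';' ∨ c = '{' ∨ c = '}' ∨ c = ','
                  · simp only [if_pos hdel]
                    have hcast : (i : Int) + 1 = ((i + 1 : Nat) : Int) := by push_cast; ring
                    have hslice : PySem.List.slice L (some (s : Int)) (some ((i : Int) + 1)) = a.buf ++ [c] := by
                      rw [hcast, PySem.List.slice_natCast, ← List.drop_take, happ]
                    unfold pvInv
                    try dsimp only
                    refine ⟨?_, by simp [h2, he'], by simp [h3, hS', hD', hT'], by simp_all, by simp_all, by simp_all, i + 1, by rw [hcast],
                      le_refl _, ?_, ?_⟩
                    · rw [hs, hslice, h1, pv_emit_merge]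
                      by_cases h0 : PySem.Str.strip (String.ofList a.buf ++ String.ofList [c]) = ""
                      · simp [h0]
                      · simp [h0, List.foldl_append]
                    · rw [List.drop_eq_nil_of_le (by rw [List.length_take]; omega)]
                    · intro hh
                      simp at hh
                  · simp only [if_neg hdel]
                    have hc1 : c ≠ ',' := fun h' => hdel (Or.inr (Or.inr (Or.inr h')))
                    have hc2 : c ≠ ';' := fun h' => hdel (Or.inl h')
                    unfold pvInv
                    try dsimp only
                    refine ⟨h1, by simp [h2, he'], by simp [h3, hS', hD', hT'], by simp_all, by simp_all, by simp_all, s, hs, by omega,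
                      happ.symm, ?_⟩
                    intro hh
                    have hmem : ',' ∈ a.buf ∨ ';' ∈ a.buf := by
                      rcases hh with h' | h' | h' | h' | h' | h'
                      · simp at h'
                      · simp at h'
                      · simp at h'
                      · simp at h'
                      · rcases List.mem_append.mp h' with h'' | h''
                        · exact Or.inl h''
                        · exact absurd (List.mem_singleton.mp h'').symm hc1
                      · rcases List.mem_append.mp h' with h'' | h''
                        · exact Or.inr h''
                        · exact absurd (List.mem_singleton.mp h'').symm hc2
                    exact pvG_snoc c (hG (Or.inr (Or.inr (Or.inr (Or.inr hmem)))))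

theorem pv_scan_rel (L : List Char) : ∀ (suf : List Char) (i : Nat) (a : PvScanA) (b : PvB),
    L.drop i = suf → pvInv L i a b →
    pvInv L (i + suf.length) (suf.foldl pvStepA a)
      ((PySem.List.enumerate suf (i : Int)).foldl (pvStepB L) b) := by
  intro suf
  induction suf with
  | nil => intro i a b _ h; simpa using h
  | cons c rest ih =>
    intro i a b hdrop h
    have hc : L[i]? = some c := by
      rw [← List.head?_drop, hdrop]; rfl
    have hrest : L.drop (i + 1) = rest := by
      have h1 : (L.drop i).drop 1 = rest := by rw [hdrop]; rfl
      rw [List.drop_drop] at h1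
      simpa [Nat.add_comm] using h1
    have hstep := pv_step_rel L i a b c hc h
    have hcast : (i : Int) + 1 = ((i + 1 : Nat) : Int) := by push_cast; ring
    simp only [List.length_cons, List.foldl_cons, PySem.List.enumerate_cons]
    rw [hcast]
    have hres := ih (i + 1) (pvStepA a c) (pvStepB L b ((i : Int), c)) hrest hstep
    have harith : i + (rest.length + 1) = (i + 1) + rest.length := by omega
    rw [harith]
    exact hres

-- ===== VERDICT (by name: the statement is the Claim_ definition above) =====
theorem split_js_into_lines_py_spec : Claim_equal_split_js_into_lines_py := by
  intro code _
  simp only [Spec_split_js_into_lines_py, split_js_into_lines_py, split_js_into_lines_py_alt]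
  have h0 : pvInv code.toList 0 ⟨[], [], false, false, false, false⟩ ⟨[], 0, none, false⟩ := by
    refine ⟨rfl, rfl, rfl, by simp, by simp, by simp, 0, rfl, le_refl 0, by simp, ?_⟩
    intro hh
    simp at hh
  have hfin := pv_scan_rel code.toList code.toList 0 ⟨[], [], false, false, false, false⟩
    ⟨[], 0, none, false⟩ rfl h0
  simp only [Nat.cast_zero, Nat.zero_add, zero_add] at hfin
  obtain ⟨h1, h2, h3, h4, h5, h6, s, hs, hsle, hbuf, hG⟩ := hfin
  have hbuf' : (code.toList.foldl pvStepA ⟨[], [], false, false, false, false⟩).buf =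
      code.toList.drop s := by
    rw [hbuf, List.take_length]
  have hslice : PySem.List.slice code.toList
      (some ((PySem.List.enumerate code.toList (0 : Int)).foldl (pvStepB code.toList)
        ⟨[], 0, none, false⟩).start) none =
      (code.toList.foldl pvStepA ⟨[], [], false, false, false, false⟩).buf := by
    rw [hs, PySem.List.slice_from_natCast, hbuf']
  rw [hslice, h1]
  set buf := (code.toList.foldl pvStepA ⟨[], [], false, false, false, false⟩).buf with hbufdef
  by_cases ht : PySem.Str.strip (String.ofList buf) = ""
  · simp [ht]
  · have hts : (PySem.Str.strip (String.ofList buf)).toList = PySem.Chars.strip buf := by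
      simp
    have hchar : ∀ d : Char, d = ',' ∨ d = ';' → PySem.Chars.strip buf ≠ [d] := by
      intro d hd heq
      have hdmem : d ∈ buf := pv_mem_strip (by rw [heq]; exact List.mem_singleton.mpr rfl)
      have hGb : pvG buf := by
        refine hG (Or.inr (Or.inr (Or.inr (Or.inr ?_))))
        rcases hd with h' | h'
        · subst h'; exact Or.inl hdmem
        · subst h'; exact Or.inr hdmem
      exact pv_strip_not_delim hGb d hd heq
    have ht1 : PySem.Str.strip (String.ofList buf) ≠ "," := by
      intro h'
      exact hchar ',' (Or.inl rfl) (by rw [← hts, h']; rfl)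
    have ht2 : PySem.Str.strip (String.ofList buf) ≠ ";" := by
      intro h'
      exact hchar ';' (Or.inr rfl) (by rw [← hts, h']; rfl)
    simp only [ne_eq, ht, not_false_iff, if_true, List.foldl_append, List.foldl_cons,
      List.foldl_nil, pvMergeStep, pv_str_strip_idem, ht1, ht2]
    simp [ht1, ht2]
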